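-- pv_equiv track=rewrite | github.com/AndrewBasore/dispatch-parser | parse_sites.py | get_supervisor
-- ===== SOURCE A (Python) =====
-- def get_supervisor(order):
--     result = ""
--     for line in order:
--         if line[1] == "Supervisor" or line[0] == "":
--             continue
--         if line[1] == "":
--             return result
--         result = result + " " + line[1]
-- ===== SOURCE B (Python) =====
-- def get_supervisor(order):
--     # pass 1: find the terminator line (empty value, non-empty key)
--     stop = next(i for i, l in enumerate(order) if l[1] == "" and l[0] != "")
--     # pass 2: join the kept values of the lines before it
--     return "".join(" " + l[1] for l in order[:stop]
--                    if l[1] != "Supervisor" and l[0] != "")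
-- ===== Notes on version B (the rewrite author's own statement) =====
-- stated objective: idiomatic
-- what changed: Replaces the single loop with early return and a running accumulator by two passes: first locate the terminator line (empty value, non-empty key) with next/enumerate, then build the result with a join over a comprehension of the lines before it.
-- outside the precondition, e.g. on get_supervisor([['a', 'b']]): A returns None, B raises StopIteration
import Mathlib
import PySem

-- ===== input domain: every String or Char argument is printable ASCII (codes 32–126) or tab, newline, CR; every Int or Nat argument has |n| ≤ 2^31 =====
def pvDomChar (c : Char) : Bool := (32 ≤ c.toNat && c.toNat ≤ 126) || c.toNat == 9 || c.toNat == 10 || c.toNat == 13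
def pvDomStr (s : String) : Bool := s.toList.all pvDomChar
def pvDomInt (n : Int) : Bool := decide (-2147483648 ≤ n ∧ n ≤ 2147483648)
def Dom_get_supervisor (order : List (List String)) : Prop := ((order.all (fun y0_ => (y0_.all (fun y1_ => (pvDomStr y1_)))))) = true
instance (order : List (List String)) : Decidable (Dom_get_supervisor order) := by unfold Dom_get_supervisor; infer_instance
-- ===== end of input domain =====

-- B rewrites A's single early-return loop as two passes (find terminator index, then filter+join); same cost, plainer shape.

-- ===== PORT A =====
-- the loop of A: 'result' is the accumulator; a missing index (IndexError, outside Pre_)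
-- and falling off the loop (Python returns None, outside Pre_) both return "" here.
def get_supervisor_loop (result : String) : List (List String) → String
  | [] => ""                                   -- Python: falls off the loop, returns None (excluded by Pre_)
  | ln :: rest =>
    match PySem.List.pyGet? ln 1, PySem.List.pyGet? ln 0 with
    | some v1, some v0 =>
      if v1 = "Supervisor" ∨ v0 = "" then get_supervisor_loop result rest
      else if v1 = "" then result
      else get_supervisor_loop (result ++ " " ++ v1) rest
    | _, _ => ""                               -- Python: IndexError (excluded by Pre_)

def get_supervisor (order : List (List String)) : String :=
  get_supervisor_loop "" order

-- ===== PORT B =====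
-- the generator condition of Source B's first pass
def pvIsStop (l : List String) : Bool :=
  (PySem.List.pyGet? l 1 == some "") && !(PySem.List.pyGet? l 0 == some "")

-- the comprehension body of Source B's second pass
def pvKeep (l : List String) : Option String :=
  match PySem.List.pyGet? l 1, PySem.List.pyGet? l 0 with
  | some v1, some v0 => if v1 ≠ "Supervisor" ∧ v0 ≠ "" then some (" " ++ v1) else none
  | _, _ => none                               -- Python: IndexError (excluded by Pre_)

def get_supervisor_alt (order : List (List String)) : String :=
  let stop := order.findIdx pvIsStop           -- next(..., len(order))
  String.join ((order.take stop).filterMap pvKeep)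

-- ===== PRECONDITION & SPEC =====
-- Pre_ excludes exactly the inputs on which Python A raises IndexError (a ln shorter
-- than 2 is reached before the terminator) or returns None instead of a string (no
-- terminator ln — empty value with non-empty key — is reached).
def Pre_get_supervisor (order : List (List String)) : Prop :=
  ∃ i < order.length,
    (∀ j < i, 2 ≤ (order.getD j []).length) ∧
    2 ≤ (order.getD i []).length ∧
    (order.getD i []).getD 1 "" = "" ∧ (order.getD i []).getD 0 "" ≠ ""
instance (order : List (List String)) : Decidable (Pre_get_supervisor order) := by
  unfold Pre_get_supervisor; infer_instance
def pvWitness_get_supervisor : List (List String) := [["k", "v"], ["x", ""]]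
def Spec_get_supervisor (order : List (List String)) (out : String) : Prop := out = get_supervisor_alt order
instance (order : List (List String)) (out : String) : Decidable (Spec_get_supervisor order out) := by unfold Spec_get_supervisor; infer_instance

-- ===== CLAIM (what is proved, stated in full; the proofs are below) =====
def Claim_equal_get_supervisor : Prop := ∀ (order : List (List String)), Dom_get_supervisor order → Pre_get_supervisor order → Spec_get_supervisor order (get_supervisor order)

-- ===== LEMMAS AND PROOFS =====

theorem pvFoldlAppendStr (l : List String) (a b : String) :
    List.foldl (fun r s => r ++ s) (a ++ b) l = a ++ List.foldl (fun r s => r ++ s) b l := by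
  induction l generalizing b with
  | nil => simp
  | cons x tl ih => simpa [String.append_assoc] using ih (b ++ x)

theorem pvJoinCons (s : String) (l : List String) :
    String.join (s :: l) = s ++ String.join l := by
  simpa [String.join] using pvFoldlAppendStr l s ""

theorem get_supervisor_main :
    ∀ (order : List (List String)), Pre_get_supervisor order →
      ∀ (result : String),
        get_supervisor_loop result order =
          result ++ String.join ((order.take (order.findIdx pvIsStop)).filterMap pvKeep) := by
  intro order
  induction order with
  | nil =>
    rintro ⟨i, hi, _⟩ _
    simp at hi
  | cons ln rest ih =>
    rintro ⟨i, hi, hpre, hleni, h1i, h0i⟩ result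
    -- the head line always has length ≥ 2
    have hlen : 2 ≤ ln.length := by
      rcases i with _ | i
      · simpa using hleni
      · simpa using hpre 0 (Nat.succ_pos _)
    have h1lt : 1 < ln.length := by omega
    have h0lt : 0 < ln.length := by omega
    have hv1 : PySem.List.pyGet? ln 1 = some ((ln[1]?).getD "") := by
      have h := PySem.List.pyGet?_ofNat ln 1 h1lt
      simp only [Nat.cast_one] at h
      rw [h, List.getElem?_eq_getElem h1lt]
      simp
    have hv0 : PySem.List.pyGet? ln 0 = some ((ln[0]?).getD "") := by
      have h := PySem.List.pyGet?_ofNat ln 0 h0lt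
      simp only [Nat.cast_zero] at h
      rw [h, List.getElem?_eq_getElem h0lt]
      simp
    by_cases hstop : (ln[1]?).getD "" = "" ∧ ¬ (ln[0]?).getD "" = ""
    · -- the head is the terminator: A returns result, B's stop index is 0
      have hIsStop : pvIsStop ln = true := by
        simp [pvIsStop, hv1, hv0]
        exact ⟨hstop.1, hstop.2⟩
      simp [get_supervisor_loop, hv1, hv0, hstop.1, List.findIdx_cons, hIsStop,
        String.join]
      intro h
      exact absurd h hstop.2
    · -- the head is not the terminator: the witness index is positive
      obtain ⟨j, rfl⟩ : ∃ j, i = j + 1 := by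
        rcases i with _ | j
        · -- i = 0 would make the head the terminator
          exfalso
          apply hstop
          simp only [List.getD_eq_getElem?_getD] at h1i h0i
          exact ⟨h1i, h0i⟩
        · exact ⟨j, rfl⟩
      have hrest : Pre_get_supervisor rest := by
        refine ⟨j, by simp at hi; omega, ?_, ?_, ?_, ?_⟩
        · intro k hk
          simpa using hpre (k + 1) (by omega)
        · simpa using hleni
        · simpa using h1i
        · simpa using h0i
      have hIsStop : pvIsStop ln = false := by
        simp [pvIsStop, hv1, hv0]
        intro h
        by_contra h'
        exact hstop ⟨h, h'⟩
      by_cases hskip : (ln[1]?).getD "" = "Supervisor" ∨ (ln[0]?).getD "" = ""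
      · -- skipped ln: filtered out on B's side
        have hkeep : pvKeep ln = none := by
          rcases hskip with h | h <;> simp [pvKeep, hv1, hv0, h]
        simp only [get_supervisor_loop, hv1, hv0, List.findIdx_cons, hIsStop, cond_false,
          List.take_succ_cons, List.filterMap_cons, hkeep, if_pos hskip]
        exact ih hrest result
      · -- accumulated ln
        have hne1 : ¬ (ln[1]?).getD "" = "" := fun h =>
          hstop ⟨h, fun h0 => hskip (Or.inr h0)⟩
        have hkeep : pvKeep ln = some (" " ++ (ln[1]?).getD "") := by
          have h0 : ¬ (ln[0]?).getD "" = "" := fun h => hskip (Or.inr h)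
          have h1 : ¬ (ln[1]?).getD "" = "Supervisor" := fun h => hskip (Or.inl h)
          simp [pvKeep, hv1, hv0]
          exact ⟨h1, h0⟩
        simp only [get_supervisor_loop, hv1, hv0, List.findIdx_cons, hIsStop, cond_false,
          List.take_succ_cons, List.filterMap_cons, hkeep,
          if_neg hskip, if_neg hne1]
        rw [ih hrest (result ++ " " ++ (ln[1]?).getD ""), pvJoinCons]
        simp [String.append_assoc]

-- ===== VERDICT (by name: the statement is the Claim_ definition above) =====
theorem get_supervisor_spec : Claim_equal_get_supervisor := by
  intro order _ hpre
  unfold Spec_get_supervisor get_supervisor get_supervisor_alt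
  simpa using get_supervisor_main order hpre ""
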